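-- pv_equiv track=rewrite | github.com/iamkhanwasim/ClinicalNLP | scripts/build_icd10_reference.py | deduplicate_codes
-- ===== SOURCE A (Python) =====
-- from typing import List, Dict, Set
--
-- def deduplicate_codes(codes: List[Dict]) -> List[Dict]:
--     """Remove duplicate codes, keeping the most complete entry."""
--     seen = {}
--     for code_data in codes:
--         code = code_data['code']
--         if code not in seen:
--             seen[code] = code_data
--         else:
--             # Keep entry with longer description
--             if len(code_data['display']) > len(seen[code]['display']):
--                 seen[code] = code_data
--
--     return list(seen.values())
-- ===== SOURCE B (Python) =====
-- def deduplicate_codes(codes):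
--     """Remove duplicate codes, keeping the most complete entry."""
--     groups = {}
--     for code_data in codes:
--         groups.setdefault(code_data['code'], []).append(code_data)
--     return [max(group, key=lambda d: len(d['display'])) for group in groups.values()]
-- ===== Notes on version B (the rewrite author's own statement) =====
-- stated objective: alternative
-- what changed: B first groups all entries by code in a single pass (first-seen order) and then reduces each group with max(key=display length), instead of A's running 'best entry so far' dict update.
-- outside the precondition, e.g. on deduplicate_codes([{'code': 'a'}]): A returns [{'code': 'a'}], B raises KeyError
import Mathlib
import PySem

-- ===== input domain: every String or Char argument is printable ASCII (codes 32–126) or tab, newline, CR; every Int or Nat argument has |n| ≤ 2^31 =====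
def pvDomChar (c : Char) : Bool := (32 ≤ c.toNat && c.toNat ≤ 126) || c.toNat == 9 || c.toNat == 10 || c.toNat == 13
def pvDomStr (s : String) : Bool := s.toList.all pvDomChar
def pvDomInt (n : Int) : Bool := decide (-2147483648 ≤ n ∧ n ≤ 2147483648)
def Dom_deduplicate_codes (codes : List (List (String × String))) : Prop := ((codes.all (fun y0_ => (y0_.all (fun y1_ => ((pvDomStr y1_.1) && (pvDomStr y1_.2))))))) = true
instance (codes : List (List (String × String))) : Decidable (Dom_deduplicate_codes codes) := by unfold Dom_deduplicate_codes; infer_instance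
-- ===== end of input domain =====

-- B replaces A's running "best entry so far" dict by a group-by pass plus a per-group max reduction (objective: alternative decomposition, same cost).

-- shared helper: Python's d[k] on a dict value (total form; Pre_ excludes the KeyError inputs)
def pvGet (d : List (String × String)) (k : String) : String := (PySem.Dict.mk d).getD k ""

-- ===== PORT A =====
def stepA (seen : PySem.Dict String (List (String × String))) (code_data : List (String × String)) : PySem.Dict String (List (String × String)) :=
  let code := pvGet code_data "code"
  if seen.contains code = false then
    seen.insert code code_data
  else if PySem.Str.len (pvGet code_data "display") > PySem.Str.len (pvGet (seen.getD code []) "display") then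
    seen.insert code code_data
  else
    seen

def deduplicate_codes (codes : List (List (String × String))) : List (List (String × String)) :=
  (codes.foldl stepA PySem.Dict.empty).values

-- ===== PORT B =====
-- the key function of B's max(group, key=lambda d: len(d['display']))
def dKey (d : List (String × String)) : Int := PySem.Str.len (pvGet d "display")

-- groups.setdefault(code, []).append(code_data)
def stepB (groups : PySem.Dict String (List (List (String × String)))) (code_data : List (String × String)) : PySem.Dict String (List (List (String × String))) :=
  groups.modify (pvGet code_data "code") [] (· ++ [code_data])

def deduplicate_codes_alt (codes : List (List (String × String))) : List (List (String × String)) :=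
  let groups := codes.foldl stepB PySem.Dict.empty
  groups.values.map (fun group => (PySem.List.max? group dKey).getD [])

-- ===== PRECONDITION & SPEC =====
-- Pre_ excludes inputs where some entry lacks the 'code' or 'display' key: A raises KeyError on a
-- missing 'code', or on a missing 'display' of an entry whose code is duplicated; on an entry with a
-- unique code but no 'display' A happens to return, while B, which evaluates the display length of
-- every entry, naturally raises KeyError there.
def Pre_deduplicate_codes (codes : List (List (String × String))) : Prop :=
  ∀ d ∈ codes, (PySem.Dict.mk d).contains "code" = true ∧ (PySem.Dict.mk d).contains "display" = true
instance (codes : List (List (String × String))) : Decidable (Pre_deduplicate_codes codes) := by unfold Pre_deduplicate_codes; infer_instance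

def pvWitness_deduplicate_codes : (List (List (String × String))) :=
  [[("code", "A1"), ("display", "short")], [("code", "A1"), ("display", "a longer one")], [("code", "B2"), ("display", "x")]]

def Spec_deduplicate_codes (codes : List (List (String × String))) (out : List (List (String × String))) : Prop := out = deduplicate_codes_alt codes
instance (codes : List (List (String × String))) (out : List (List (String × String))) : Decidable (Spec_deduplicate_codes codes out) := by unfold Spec_deduplicate_codes; infer_instance

-- ===== CLAIM (what is proved, stated in full; the proofs are below) =====
def Claim_equal_deduplicate_codes : Prop := ∀ (codes : List (List (String × String))), Dom_deduplicate_codes codes → Pre_deduplicate_codes codes → Spec_deduplicate_codes codes (deduplicate_codes codes)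

-- ===== LEMMAS AND PROOFS =====

-- the value B's reduction picks out of one group
def bestOf (g : List (List (String × String))) : List (String × String) := (PySem.List.max? g dKey).getD []

-- the invariant tying A's running dict to B's group dict after any common prefix
def InvAB (seen : PySem.Dict String (List (String × String))) (groups : PySem.Dict String (List (List (String × String)))) : Prop :=
  seen.items = groups.items.map (fun p => (p.1, bestOf p.2))
  ∧ (groups.items.map Prod.fst).Nodup
  ∧ ∀ p ∈ groups.items, p.2 ≠ []

lemma bestOf_singleton (cd : List (String × String)) : bestOf [cd] = cd := rfl

lemma bestOf_append (g : List (List (String × String))) (cd : List (String × String)) (hne : g ≠ []) :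
    bestOf (g ++ [cd]) = if dKey (bestOf g) < dKey cd then cd else bestOf g := by
  cases h : PySem.List.max? g dKey with
  | none => exact absurd ((PySem.List.max?_eq_none_iff g dKey).mp h) hne
  | some m =>
    simp only [bestOf, PySem.List.max?, List.foldl_append] at *
    rw [h]
    simp only [List.foldl, Option.getD_some]
    split_ifs <;> simp

lemma inv_step (seen : PySem.Dict String (List (String × String)))
    (groups : PySem.Dict String (List (List (String × String))))
    (cd : List (String × String)) (h : InvAB seen groups) : InvAB (stepA seen cd) (stepB groups cd) := by
  obtain ⟨hItems, hNd, hNe⟩ := h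
  set c := pvGet cd "code" with hc
  have hcont : seen.contains c = groups.contains c := by
    simp [PySem.Dict.contains, hItems, List.any_map, Function.comp_def]
  by_cases hin : groups.contains c = true
  · -- c already grouped: groups has a unique entry (c, g); A compares with bestOf g
    obtain ⟨pr, hfind⟩ : ∃ pr, groups.items.find? (fun p => p.1 == c) = some pr := by
      have hin2 := hin
      simp only [PySem.Dict.contains, List.any_eq_true] at hin2
      obtain ⟨p, hp, hpc⟩ := hin2
      cases hf : groups.items.find? (fun p => p.1 == c) with
      | none => exact absurd hpc (by simpa using List.find?_eq_none.mp hf p hp)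
      | some q => exact ⟨q, rfl⟩
    have hprmem : pr ∈ groups.items := List.mem_of_find?_eq_some hfind
    have hprc : pr.1 = c := by simpa using List.find?_some hfind
    have hget : groups.get? c = some pr.2 := by simp [PySem.Dict.get?, hfind]
    have hgetA : seen.get? c = some (bestOf pr.2) := by
      simp only [PySem.Dict.get?, hItems, List.find?_map]
      simp [Function.comp_def, hfind]
    have hprne : pr.2 ≠ [] := hNe pr hprmem
    have huniq : ∀ p ∈ groups.items, p.1 = c → p = pr :=
      fun p hp hpc => List.inj_on_of_nodup_map hNd hp hprmem (hpc.trans hprc.symm)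
    have hBitems : (stepB groups cd).items
        = groups.items.map (fun p => if p.1 == c then (c, p.2 ++ [cd]) else p) := by
      simp only [stepB, PySem.Dict.modify, PySem.Dict.insert, ← hc, hin, if_true,
        PySem.Dict.getD, hget, Option.getD_some]
      refine List.map_congr_left fun p hp => ?_
      by_cases hpc : p.1 = c
      · have := huniq p hp hpc; subst this; simp
      · simp [hpc]
    have hkeysB : ((stepB groups cd).items.map Prod.fst) = groups.items.map Prod.fst := by
      rw [hBitems, List.map_map]
      refine List.map_congr_left fun p hp => ?_
      by_cases hpc : p.1 = c <;> simp [hpc]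
    have hAcond : (PySem.Str.len (pvGet cd "display") > PySem.Str.len (pvGet (seen.getD c []) "display"))
        = (dKey (bestOf pr.2) < dKey cd) := by
      simp [PySem.Dict.getD, hgetA, dKey, gt_iff_lt]
    refine ⟨?_, by rw [hkeysB]; exact hNd, ?_⟩
    · -- items relation
      rw [hBitems, List.map_map]
      simp only [stepA, ← hc, hcont, hin]
      simp only [Bool.true_eq_false, if_false]
      by_cases hlt : dKey (bestOf pr.2) < dKey cd
      · rw [if_pos (by rw [hAcond]; exact hlt)]
        simp only [PySem.Dict.insert, show seen.contains c = true from hcont.trans hin, if_true]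
        rw [hItems, List.map_map]
        refine List.map_congr_left fun p hp => ?_
        by_cases hpc : p.1 = c
        · have := huniq p hp hpc; subst this
          simp [Function.comp, hprc, bestOf_append _ _ hprne, hlt]
        · simp [Function.comp, hpc]
      · rw [if_neg (by rw [hAcond]; exact hlt)]
        rw [hItems]
        refine List.map_congr_left fun p hp => ?_
        by_cases hpc : p.1 = c
        · have := huniq p hp hpc; subst this
          simp [Function.comp, hprc, bestOf_append _ _ hprne, hlt]
        · simp [Function.comp, hpc]
    · -- nonemptiness
      rw [hBitems]
      intro p hp
      simp only [List.mem_map] at hp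
      obtain ⟨q, hq, rfl⟩ := hp
      by_cases hpc : q.1 = c <;> simp [hpc] <;> exact hNe q hq
  · -- new code: both append
    have hin' : groups.contains c = false := by simpa using hin
    have hnotin : ∀ p ∈ groups.items, ¬ (p.1 = c) := by
      simp only [PySem.Dict.contains] at hin'
      simpa using List.any_eq_false.mp hin'
    have hgetD : groups.getD c [] = [] := by
      have hf : groups.items.find? (fun p => p.1 == c) = none :=
        List.find?_eq_none.mpr (fun p hp => by simpa using hnotin p hp)
      simp [PySem.Dict.getD, PySem.Dict.get?, hf]
    have hBitems : (stepB groups cd).items = groups.items ++ [(c, [cd])] := by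
      simp [stepB, PySem.Dict.modify, PySem.Dict.insert, ← hc, hin', hgetD]
    have hAitems : (stepA seen cd).items = seen.items ++ [(c, cd)] := by
      simp only [stepA, ← hc, hcont, hin', if_true]
      simp [PySem.Dict.insert, hcont, hin']
    refine ⟨?_, ?_, ?_⟩
    · rw [hAitems, hBitems, hItems]; simp [bestOf_singleton]
    · rw [hBitems]
      simp only [List.map_append, List.map_cons, List.map_nil]
      rw [List.nodup_append]
      refine ⟨hNd, by simp, ?_⟩
      intro a ha b hb
      obtain ⟨p, hp, hpc⟩ := List.mem_map.mp ha
      have hbc : b = c := by simpa using hb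
      subst hbc hpc
      exact fun h => hnotin p hp h
    · rw [hBitems]
      intro p hp
      rcases List.mem_append.mp hp with h1 | h2
      · exact hNe p h1
      · have := by simpa using h2
        subst this; simp

lemma inv_fold (codes : List (List (String × String)))
    (seen : PySem.Dict String (List (String × String)))
    (groups : PySem.Dict String (List (List (String × String))))
    (h : InvAB seen groups) : InvAB (codes.foldl stepA seen) (codes.foldl stepB groups) := by
  induction codes generalizing seen groups with
  | nil => exact h
  | cons cd rest ih => exact ih _ _ (inv_step seen groups cd h)

-- ===== VERDICT (by name: the statement is the Claim_ definition above) =====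
theorem deduplicate_codes_spec : Claim_equal_deduplicate_codes := by
  intro codes _ _
  unfold Spec_deduplicate_codes deduplicate_codes deduplicate_codes_alt
  have h := inv_fold codes PySem.Dict.empty PySem.Dict.empty ⟨rfl, List.Pairwise.nil, by simp [PySem.Dict.empty]⟩
  obtain ⟨hItems, -, -⟩ := h
  simp only [PySem.Dict.values, hItems, List.map_map]
  exact List.map_congr_left fun p _ => rfl
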